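-- pv_equiv track=rewrite | github.com/vitorflopes/AT---Velocidade-e-Qualidade | q7.py | encontra_duplicatas
-- ===== SOURCE A (Python) =====
-- def encontra_duplicatas(lista):
--     vistos = {}
--     duplicatas = []
--     for elemento in lista:
--         if elemento in vistos:
--             duplicatas.append(elemento)
--         else:
--             vistos[elemento] = True
--     return duplicatas
-- ===== SOURCE B (Python) =====
-- def encontra_duplicatas(lista):
--     first = {}
--     for i, x in enumerate(lista):
--         if x not in first:
--             first[x] = i
--     return [x for i, x in enumerate(lista) if first[x] < i]
-- ===== Notes on version B (the rewrite author's own statement) =====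
-- stated objective: alternative
-- what changed: Replaces the single-pass seen-dict accumulator with two passes: first build a dict of each element's first index, then a comprehension keeps every element whose first index is strictly below its position.
import Mathlib
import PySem

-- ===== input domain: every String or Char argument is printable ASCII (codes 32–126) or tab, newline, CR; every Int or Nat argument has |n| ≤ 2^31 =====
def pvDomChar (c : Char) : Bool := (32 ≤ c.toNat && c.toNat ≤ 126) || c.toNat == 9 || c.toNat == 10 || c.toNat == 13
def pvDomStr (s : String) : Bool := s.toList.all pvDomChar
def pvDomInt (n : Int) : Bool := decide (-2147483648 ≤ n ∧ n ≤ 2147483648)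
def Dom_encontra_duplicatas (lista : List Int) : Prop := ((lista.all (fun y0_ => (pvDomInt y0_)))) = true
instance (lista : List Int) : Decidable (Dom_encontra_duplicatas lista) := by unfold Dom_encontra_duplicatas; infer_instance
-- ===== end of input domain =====

-- B replaces A's single-pass seen-dict accumulator by two passes (first-index dict, then a
-- comprehension keeping elements whose first index is below their position); objective: alternative.

-- ===== PORT A =====
-- A: one pass; vistos is a dict used as a set, duplicatas accumulates repeats in order.
def encontra_duplicatas (lista : List Int) : List Int :=
  (lista.foldl
    (fun (st : PySem.Dict Int Bool × List Int) elemento =>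
      if st.1.contains elemento then (st.1, st.2 ++ [elemento])
      else (st.1.insert elemento true, st.2))
    ((PySem.Dict.empty : PySem.Dict Int Bool), ([] : List Int))).2

-- ===== PORT B =====
-- first pass of Source B: dict mapping each element to the index of its first occurrence
def firstIndexDict (lista : List Int) : PySem.Dict Int Int :=
  (PySem.List.enumerate lista 0).foldl
    (fun (d : PySem.Dict Int Int) p => if d.contains p.2 then d else d.insert p.2 p.1)
    PySem.Dict.empty

-- second pass of Source B: the comprehension [x for i, x in enumerate(lista) if first[x] < i];
-- first[x] is always present, so the total getD (default 0) is exact here.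
def encontra_duplicatas_alt (lista : List Int) : List Int :=
  (PySem.List.enumerate lista 0).filterMap
    (fun p => if (firstIndexDict lista).getD p.2 0 < p.1 then some p.2 else none)

-- ===== PRECONDITION & SPEC =====
def Spec_encontra_duplicatas (lista : List Int) (out : List Int) : Prop := out = encontra_duplicatas_alt lista
instance (lista : List Int) (out : List Int) : Decidable (Spec_encontra_duplicatas lista out) := by unfold Spec_encontra_duplicatas; infer_instance

-- ===== CLAIM (what is proved, stated in full; the proofs are below) =====
def Claim_equal_encontra_duplicatas : Prop := ∀ (lista : List Int), Dom_encontra_duplicatas lista → Spec_encontra_duplicatas lista (encontra_duplicatas lista)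

-- ===== LEMMAS AND PROOFS =====

-- lookup through B's first pass: a key already in d keeps its value, a new key gets s + (its first index in xs)
lemma fd_fold_get (xs : List Int) : ∀ (d : PySem.Dict Int Int) (s y : Int),
    ((PySem.List.enumerate xs s).foldl
      (fun (d : PySem.Dict Int Int) p => if d.contains p.2 then d else d.insert p.2 p.1) d).get? y
    = (d.get? y).or ((PySem.List.index? xs y).map (fun k => s + (k : Int))) := by
  induction xs with
  | nil => intro d s y; simp [PySem.List.enumerate_nil, PySem.List.index?_eq_idxOf?]
  | cons x xs ih =>
    intro d s y
    rw [PySem.List.enumerate_cons, List.foldl_cons]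
    by_cases hc : d.contains x
    · simp only [hc, if_pos, ih]
      by_cases hxy : x = y
      · subst hxy
        have hs : (d.get? x).isSome := by rw [← PySem.Dict.contains_eq_isSome_get?]; exact hc
        obtain ⟨v, hv⟩ := Option.isSome_iff_exists.mp hs
        simp [hv]
      · rw [PySem.List.index?_cons_of_ne xs hxy]
        cases hk : PySem.List.index? xs y with
        | none => simp
        | some k => simp; congr 1; ring
    · rw [if_neg hc, ih]
      by_cases hxy : x = y
      · subst hxy
        have hn : d.get? x = none := by
          rw [PySem.Dict.get?_eq_none_iff_contains]; simpa using hc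
        rw [PySem.Dict.get?_insert_self, hn, PySem.List.index?_cons_self]
        simp
      · rw [PySem.Dict.get?_insert_of_ne d s (Ne.symm hxy),
            PySem.List.index?_cons_of_ne xs hxy]
        cases hk : PySem.List.index? xs y with
        | none => simp
        | some k => simp; congr 1; ring

lemma get?_firstIndexDict (lista : List Int) (y : Int) :
    (firstIndexDict lista).get? y = (PySem.List.index? lista y).map (fun k => (k : Int)) := by
  unfold firstIndexDict
  rw [fd_fold_get]
  simp [PySem.Dict.get?_empty]

-- the comprehension's test at position pre.length: first[x] < pre.length ↔ x occurred in pre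
lemma firstIdx_lt (pre xs : List Int) (x : Int) :
    ((firstIndexDict (pre ++ x :: xs)).getD x 0 < (pre.length : Int)) ↔ x ∈ pre := by
  rw [PySem.Dict.getD_eq_get?_getD, get?_firstIndexDict]
  by_cases hx : x ∈ pre
  · rw [PySem.List.index?_append_of_mem (x :: xs) hx]
    obtain ⟨k, hk⟩ := Option.isSome_iff_exists.mp ((PySem.List.index?_isSome_iff pre x).mpr hx)
    obtain ⟨hlt, -, -⟩ := PySem.List.getElem_of_index?_eq_some hk
    rw [hk]
    simp only [hx, iff_true]
    show ((k : Nat) : Int) < ((pre.length : Nat) : Int)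
    exact_mod_cast hlt
  · have h1 : PySem.List.index? (pre ++ x :: xs) x = some pre.length :=
      (PySem.List.index?_eq_some_iff _ _ _).mpr ⟨pre, xs, rfl, rfl, hx⟩
    rw [h1]
    simp only [hx, iff_false]
    show ¬(((pre.length : Nat) : Int) < ((pre.length : Nat) : Int))
    exact lt_irrefl _

-- main invariant: A's remaining fold from a dict agreeing with the processed prefix pre
-- produces exactly acc ++ B's comprehension over the remaining enumerated suffix
lemma main_inv (lista : List Int) : ∀ (xs pre : List Int) (d : PySem.Dict Int Bool) (acc : List Int),
    lista = pre ++ xs →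
    (∀ y, d.contains y = decide (y ∈ pre)) →
    (xs.foldl
      (fun (st : PySem.Dict Int Bool × List Int) elemento =>
        if st.1.contains elemento then (st.1, st.2 ++ [elemento])
        else (st.1.insert elemento true, st.2)) (d, acc)).2
    = acc ++ (PySem.List.enumerate xs (pre.length : Int)).filterMap
        (fun p => if (firstIndexDict lista).getD p.2 0 < p.1 then some p.2 else none) := by
  intro xs
  induction xs with
  | nil => intro pre d acc _ _; simp [PySem.List.enumerate_nil]
  | cons x xs ih =>
    intro pre d acc hl hd
    have hcond : ((firstIndexDict lista).getD x 0 < (pre.length : Int)) ↔ x ∈ pre := by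
      rw [hl]; exact firstIdx_lt pre xs x
    have hlen : ((pre.length : Int) + 1) = (((pre ++ [x]).length : Nat) : Int) := by simp
    have hl' : lista = (pre ++ [x]) ++ xs := by rw [hl]; simp
    rw [PySem.List.enumerate_cons, List.foldl_cons]
    by_cases hx : x ∈ pre
    · rw [List.filterMap_cons_some (b := x) (by simp only; rw [if_pos (hcond.mpr hx)]),
          show (if (d, acc).1.contains x = true then ((d, acc).1, (d, acc).2 ++ [x])
                else ((d, acc).1.insert x true, (d, acc).2)) = (d, acc ++ [x]) from by
            simp [hd, hx]]
      have hinv : ∀ y, d.contains y = decide (y ∈ pre ++ [x]) := by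
        intro y
        rw [hd y, decide_eq_decide]
        simp only [List.mem_append, List.mem_singleton]
        refine ⟨Or.inl, fun h => ?_⟩
        rcases h with h | h
        · exact h
        · subst h; exact hx
      rw [hlen, ih (pre ++ [x]) d (acc ++ [x]) hl' hinv]
      simp
    · rw [List.filterMap_cons_none (by simp only; rw [if_neg (fun h => hx (hcond.mp h))]),
          show (if (d, acc).1.contains x = true then ((d, acc).1, (d, acc).2 ++ [x])
                else ((d, acc).1.insert x true, (d, acc).2)) = (d.insert x true, acc) from by
            simp [hd, hx]]
      have hinv : ∀ y, (d.insert x true).contains y = decide (y ∈ pre ++ [x]) := by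
        intro y
        rw [PySem.Dict.contains_insert, hd y]
        by_cases h : y = x
        · subst h; simp
        · simp [h]
      rw [hlen, ih (pre ++ [x]) (d.insert x true) acc hl' hinv]

-- ===== VERDICT (by name: the statement is the Claim_ definition above) =====
theorem encontra_duplicatas_spec : Claim_equal_encontra_duplicatas := by
  intro lista _
  unfold Spec_encontra_duplicatas encontra_duplicatas encontra_duplicatas_alt
  have := main_inv lista lista [] PySem.Dict.empty [] (by simp)
    (by intro y; simp [PySem.Dict.contains_empty])
  simpa using this
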